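-- pv_equiv track=rewrite | github.com/ben-d-t/ben-d-t.github.io | adventofcode2023/day18/main2.py | construct_boundary_coordinates
-- ===== SOURCE A (Python) =====
-- def construct_boundary_coordinates(instructions):
--     x = y = 0
--     coordinates = [(x, y)]
--
--     for direction, distance in instructions:
--         if direction == 'U':
--             y -= distance
--         elif direction == 'D':
--             y += distance
--         elif direction == 'L':
--             x -= distance
--         elif direction == 'R':
--             x += distance
--         coordinates.append((x, y))
--
--     return coordinates
-- ===== SOURCE B (Python) =====
-- _DELTAS = {'U': (0, -1), 'D': (0, 1), 'L': (-1, 0), 'R': (1, 0)}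
--
-- def construct_boundary_coordinates(instructions):
--     # pass 1: map each instruction to a scaled delta (unknown directions -> (0, 0))
--     deltas = [(ux * distance, uy * distance)
--               for direction, distance in instructions
--               for ux, uy in [_DELTAS.get(direction, (0, 0))]]
--     # pass 2: prefix-sum the deltas starting from the origin
--     coordinates = [(0, 0)]
--     for dx, dy in deltas:
--         px, py = coordinates[-1]
--         coordinates.append((px + dx, py + dy))
--     return coordinates
-- ===== Notes on version B (the rewrite author's own statement) =====
-- stated objective: alternative
-- what changed: A's single fused loop that mutates a live (x,y) under an if/elif direction chain is replaced by two passes: a map from each instruction to a scaled (dx,dy) delta via a direction table (defaulting to (0,0)), followed by a prefix-sum scan producing the coordinate list.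
import Mathlib
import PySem

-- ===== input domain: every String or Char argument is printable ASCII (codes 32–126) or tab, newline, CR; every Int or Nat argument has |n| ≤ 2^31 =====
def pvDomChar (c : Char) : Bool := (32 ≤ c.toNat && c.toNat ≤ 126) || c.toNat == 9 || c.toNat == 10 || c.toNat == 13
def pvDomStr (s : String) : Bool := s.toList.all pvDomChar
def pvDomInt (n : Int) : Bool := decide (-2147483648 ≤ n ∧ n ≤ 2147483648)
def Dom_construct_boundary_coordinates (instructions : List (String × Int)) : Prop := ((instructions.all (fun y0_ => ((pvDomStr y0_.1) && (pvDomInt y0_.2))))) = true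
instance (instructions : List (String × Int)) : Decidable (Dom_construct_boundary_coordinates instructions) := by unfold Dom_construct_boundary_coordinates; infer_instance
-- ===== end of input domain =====

-- B replaces A's fused mutate-and-append loop by a map to scaled deltas plus a prefix-sum scan (alternative decomposition, same cost).


-- ===== PORT A =====
-- one step of A's loop: update (x, y) by the if/elif chain, append the new point
def cbcStepA (st : (Int × Int) × List (Int × Int)) (ins : String × Int) :
    (Int × Int) × List (Int × Int) :=
  let (direction, distance) := ins
  let (x, y) := st.1
  let p :=
    if direction = "U" then (x, y - distance)
    else if direction = "D" then (x, y + distance)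
    else if direction = "L" then (x - distance, y)
    else if direction = "R" then (x + distance, y)
    else (x, y)
  (p, st.2 ++ [p])

def construct_boundary_coordinates (instructions : List (String × Int)) : List (Int × Int) :=
  (instructions.foldl cbcStepA ((0, 0), [(0, 0)])).2

-- ===== PORT B =====
-- direction table (Source B's _DELTAS), looked up with default (0,0)
def cbcUnitDelta (direction : String) : Int × Int :=
  PySem.Dict.getD (PySem.Dict.ofList [("U", ((0 : Int), (-1 : Int))), ("D", (0, 1)), ("L", (-1, 0)), ("R", (1, 0))])
    direction (0, 0)

-- Source B pass 1: map each instruction to its scaled delta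
def cbcScaledDelta (ins : String × Int) : Int × Int :=
  ((cbcUnitDelta ins.1).1 * ins.2, (cbcUnitDelta ins.1).2 * ins.2)

-- Source B pass 2: prefix-sum scan (the loop appending coordinates[-1] + delta)
def cbcScan (p : Int × Int) : List (Int × Int) → List (Int × Int)
  | [] => [p]
  | d :: ds => p :: cbcScan (p.1 + d.1, p.2 + d.2) ds

def construct_boundary_coordinates_alt (instructions : List (String × Int)) : List (Int × Int) :=
  cbcScan (0, 0) (instructions.map cbcScaledDelta)

-- ===== PRECONDITION & SPEC =====
def Spec_construct_boundary_coordinates (instructions : List (String × Int)) (out : List (Int × Int)) : Prop := out = construct_boundary_coordinates_alt instructions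
instance (instructions : List (String × Int)) (out : List (Int × Int)) : Decidable (Spec_construct_boundary_coordinates instructions out) := by unfold Spec_construct_boundary_coordinates; infer_instance

-- ===== CLAIM (what is proved, stated in full; the proofs are below) =====
def Claim_equal_construct_boundary_coordinates : Prop := ∀ (instructions : List (String × Int)), Dom_construct_boundary_coordinates instructions → Spec_construct_boundary_coordinates instructions (construct_boundary_coordinates instructions)

-- ===== LEMMAS AND PROOFS =====

-- B's table lookup written as an if-chain
theorem cbcUnitDelta_eq (d : String) :
    cbcUnitDelta d =
      if d = "U" then ((0 : Int), (-1 : Int)) else if d = "D" then (0, 1)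
      else if d = "L" then (-1, 0) else if d = "R" then (1, 0) else (0, 0) := by
  by_cases h1 : d = "U"
  · subst h1; decide
  by_cases h2 : d = "D"
  · subst h2; decide
  by_cases h3 : d = "L"
  · subst h3; decide
  by_cases h4 : d = "R"
  · subst h4; decide
  simp [cbcUnitDelta, PySem.Dict.getD, PySem.Dict.ofList, PySem.Dict.get?, PySem.Dict.update,
    PySem.Dict.insert, PySem.Dict.contains, PySem.Dict.empty, List.find?, h1, h2, h3, h4,
    show ("U" == d) = false from by simp [Ne.symm h1],
    show ("D" == d) = false from by simp [Ne.symm h2],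
    show ("L" == d) = false from by simp [Ne.symm h3],
    show ("R" == d) = false from by simp [Ne.symm h4]]

-- A's if/elif update equals adding B's scaled delta
theorem cbcStep_point (l : List (Int × Int)) (x y : Int) (d : String) (n : Int) :
    (cbcStepA ((x, y), l) (d, n)).1 =
      (x + (cbcScaledDelta (d, n)).1, y + (cbcScaledDelta (d, n)).2) := by
  simp only [cbcStepA, cbcScaledDelta, cbcUnitDelta_eq]
  split_ifs <;> simp <;> ring

theorem cbcStep_list (st : (Int × Int) × List (Int × Int)) (ins : String × Int) :
    (cbcStepA st ins).2 = st.2 ++ [(cbcStepA st ins).1] := by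
  obtain ⟨⟨x, y⟩, l⟩ := st
  obtain ⟨d, n⟩ := ins
  simp [cbcStepA]

theorem cbcScan_cons (p : Int × Int) (ds : List (Int × Int)) :
    cbcScan p ds = p :: (cbcScan p ds).tail := by
  cases ds <;> simp [cbcScan]

theorem cbc_fold_scan (instructions : List (String × Int)) :
    ∀ (p : Int × Int) (acc : List (Int × Int)),
      (instructions.foldl cbcStepA (p, acc)).2 =
        acc ++ (cbcScan p (instructions.map cbcScaledDelta)).tail := by
  induction instructions with
  | nil => intro p acc; simp [cbcScan]
  | cons i rest ih =>
    intro p acc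
    obtain ⟨x, y⟩ := p
    obtain ⟨d, n⟩ := i
    have hpt := cbcStep_point acc x y d n
    have hls := cbcStep_list ((x, y), acc) (d, n)
    simp only [List.foldl_cons, List.map_cons, cbcScan]
    have : cbcStepA ((x, y), acc) (d, n) =
        ((x + (cbcScaledDelta (d, n)).1, y + (cbcScaledDelta (d, n)).2),
          acc ++ [(x + (cbcScaledDelta (d, n)).1, y + (cbcScaledDelta (d, n)).2)]) := by
      rw [← hpt]; rw [Prod.ext_iff]; exact ⟨rfl, by rw [hls, hpt]⟩
    rw [this, ih, List.tail_cons,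
      cbcScan_cons (x + (cbcScaledDelta (d, n)).1, y + (cbcScaledDelta (d, n)).2)
        (List.map cbcScaledDelta rest)]
    simp


-- ===== VERDICT (by name: the statement is the Claim_ definition above) =====
theorem construct_boundary_coordinates_spec : Claim_equal_construct_boundary_coordinates := by
  intro instructions _
  unfold Spec_construct_boundary_coordinates construct_boundary_coordinates
    construct_boundary_coordinates_alt
  rw [cbc_fold_scan instructions (0, 0) [(0, 0)],
    cbcScan_cons (0, 0) (instructions.map cbcScaledDelta)]
  simp
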